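-- pv_equiv track=rewrite | github.com/nathanzhu144/practices | zzz/2021_amazon_q1.py | sortOrders
-- ===== SOURCE A (Python) =====
-- def sortOrders(orderList):
--     prime, nonprime = [], []
--
--     for item in orderList:
--         arr = item.split()
--         if arr[1].isalpha():
--             prime.append((tuple(arr[1:]), arr[0], item))
--         else:
--             nonprime.append(item)
--     prime.sort()
--
--     return [item[2] for item in prime] + nonprime
-- ===== SOURCE B (Python) =====
-- def sortOrders(orderList):
--     def key(item):
--         arr = item.split()
--         if arr[1].isalpha():
--             return (0, tuple(arr[1:]), arr[0], item)
--         return (1, (), '', '')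
--     return sorted(orderList, key=key)
-- ===== Notes on version B (the rewrite author's own statement) =====
-- stated objective: idiomatic
-- what changed: Replaced A's partition-into-two-lists / sort-the-prime-half / concatenate control flow with one stable sorted() over the whole list under a two-level key: prime logs get a 0-tagged key carrying their metadata, id and full line, non-prime logs a constant 1-tagged key, so stability keeps them in input order at the end.
import Mathlib
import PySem

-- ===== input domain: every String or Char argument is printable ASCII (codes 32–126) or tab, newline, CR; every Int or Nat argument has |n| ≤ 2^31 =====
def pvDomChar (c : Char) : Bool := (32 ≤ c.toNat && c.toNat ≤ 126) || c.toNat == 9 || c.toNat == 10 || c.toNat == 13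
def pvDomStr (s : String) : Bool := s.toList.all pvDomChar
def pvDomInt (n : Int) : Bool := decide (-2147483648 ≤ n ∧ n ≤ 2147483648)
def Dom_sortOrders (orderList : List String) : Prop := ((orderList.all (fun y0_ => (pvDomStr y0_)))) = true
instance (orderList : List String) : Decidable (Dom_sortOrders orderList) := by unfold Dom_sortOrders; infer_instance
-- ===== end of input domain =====

-- B replaces A's partition / sort-the-prime-half / concatenate control flow with ONE stable
-- sort of the whole list under a two-level key; objective: idiomatic.
--
-- Tuple encoding used by BOTH ports: Python's string tuples are encoded as List (List String)
-- (one entry per tuple component; a plain string component s becomes the singleton [s]), so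
-- that Lean's lexicographic `<` on lists is exactly Python's tuple comparison (all prime keys
-- have the same arity, so the prefix rule is never reached between two prime keys).

-- ===== PORT A =====
-- A's triple (tuple(arr[1:]), arr[0], item) is encoded [arr[1:], [arr[0]], [item]].
def sortOrders (orderList : List String) : List String :=
  let pn : List (List (List String)) × List String :=
    orderList.foldl (fun acc item =>
      let arr := PySem.Str.split₀ item
      if PySem.Str.strIsalpha (PySem.List.pyGetD arr 1 "") then
        (acc.1 ++ [[PySem.List.slice arr (some 1) none, [PySem.List.pyGetD arr 0 ""], [item]]], acc.2)
      else
        (acc.1, acc.2 ++ [item])) ([], [])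
  (PySem.List.sorted pn.1 (fun x => x) false).map (fun t => (t.getD 2 []).getD 0 "") ++ pn.2

-- ===== PORT B =====
-- B's key: 0-tagged (tuple(arr[1:]), arr[0], item) for prime logs, a constant 1-tagged key for
-- the rest; the int tag 0 is encoded as []
-- and 1 as [""] ([] < [""] exactly as 0 < 1; the tag decides every prime-vs-nonprime compare).
def sortOrdersKeyB (item : String) : List (List String) :=
  let arr := PySem.Str.split₀ item
  if PySem.Str.strIsalpha (PySem.List.pyGetD arr 1 "") then
    [[], PySem.List.slice arr (some 1) none, [PySem.List.pyGetD arr 0 ""], [item]]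
  else
    [[""], [], [""], [""]]

def sortOrders_alt (orderList : List String) : List String :=
  PySem.List.sorted orderList sortOrdersKeyB false

-- ===== PRECONDITION & SPEC =====
-- Pre_ excludes exactly the items whose whitespace-split has fewer than two tokens:
-- there Python A (and Python B) raise IndexError on arr[1].
def Pre_sortOrders (orderList : List String) : Prop :=
  ∀ item ∈ orderList, 2 ≤ (PySem.Str.split₀ item).length
instance (orderList : List String) : Decidable (Pre_sortOrders orderList) := by
  unfold Pre_sortOrders; infer_instance

def pvWitness_sortOrders : List String := ["2 13 26 1", "1 abc def", "3 xy zz", "0 99 1"]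

def Spec_sortOrders (orderList : List String) (out : List String) : Prop := out = sortOrders_alt orderList
instance (orderList : List String) (out : List String) : Decidable (Spec_sortOrders orderList out) := by unfold Spec_sortOrders; infer_instance

-- ===== CLAIM (what is proved, stated in full; the proofs are below) =====
def Claim_equal_sortOrders : Prop := ∀ (orderList : List String), Dom_sortOrders orderList → Pre_sortOrders orderList → Spec_sortOrders orderList (sortOrders orderList)

-- ===== LEMMAS AND PROOFS =====

-- abbreviations for the proof (not used by the ports)
def pvIsPr (item : String) : Bool :=
  PySem.Str.strIsalpha (PySem.List.pyGetD (PySem.Str.split₀ item) 1 "")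

def pvTrip (item : String) : List (List String) :=
  [PySem.List.slice (PySem.Str.split₀ item) (some 1) none,
   [PySem.List.pyGetD (PySem.Str.split₀ item) 0 ""], [item]]

def pvProj (t : List (List String)) : String := (t.getD 2 []).getD 0 ""

-- A's partition loop is filter+map / filter
lemma pv_fold_partition (l : List String)
    (p0 : List (List (List String))) (n0 : List String) :
    l.foldl (fun acc item =>
      let arr := PySem.Str.split₀ item
      if PySem.Str.strIsalpha (PySem.List.pyGetD arr 1 "") then
        (acc.1 ++ [[PySem.List.slice arr (some 1) none, [PySem.List.pyGetD arr 0 ""], [item]]], acc.2)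
      else
        (acc.1, acc.2 ++ [item])) (p0, n0)
      = (p0 ++ (l.filter pvIsPr).map pvTrip, n0 ++ l.filter (fun i => !pvIsPr i)) := by
  induction l generalizing p0 n0 with
  | nil => simp
  | cons x xs ih =>
    by_cases hx : pvIsPr x = true
    · have hxs : PySem.Str.strIsalpha (PySem.List.pyGetD (PySem.Str.split₀ x) 1 "") = true := by
        simpa [pvIsPr] using hx
      simp only [List.foldl_cons, List.filter_cons, hx, if_true, hxs]
      rw [ih]
      simp [pvTrip]
    · have hxs : PySem.Str.strIsalpha (PySem.List.pyGetD (PySem.Str.split₀ x) 1 "") = false := by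
        simpa [pvIsPr] using hx
      simp only [List.foldl_cons, List.filter_cons, hx, hxs, Bool.false_eq_true, if_false,
        Bool.not_false, if_true]
      rw [ih]
      simp

lemma pv_insertBy_append_all_before {α : Type} (before : α → α → Bool) (x : α)
    (as bs : List α) (h : ∀ y ∈ bs, before x y = true) :
    PySem.List.insertBy before x (as ++ bs) = PySem.List.insertBy before x as ++ bs := by
  induction as with
  | nil =>
    cases bs with
    | nil => simp
    | cons b bs' =>
      simp [PySem.List.insertBy, h b (by simp)]
  | cons a as' ih =>
    simp only [List.cons_append, PySem.List.insertBy]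
    by_cases ha : before x a = true
    · simp [ha]
    · simp [ha, ih]

lemma pv_insertBy_map {α β : Type} (before : α → α → Bool) (before' : β → β → Bool)
    (f : α → β) (t0 : α) (ts : List α)
    (h : ∀ t ∈ ts, before' (f t0) (f t) = before t0 t) :
    PySem.List.insertBy before' (f t0) (ts.map f) = (PySem.List.insertBy before t0 ts).map f := by
  induction ts with
  | nil => simp [PySem.List.insertBy]
  | cons t ts' ih =>
    simp only [List.map_cons, PySem.List.insertBy, h t (by simp)]
    by_cases ht : before t0 t = true
    · simp [ht]
    · simp [ht, ih (fun u hu => h u (by simp [hu]))]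

-- shorthand for the two comparison functions
def pvBA (a b : List (List String)) : Bool := decide (a < b)
def pvBB (a b : String) : Bool := decide (sortOrdersKeyB a < sortOrdersKeyB b)

lemma pv_keyB_prime (x : String) (hx : pvIsPr x = true) :
    sortOrdersKeyB x = [] :: pvTrip x := by
  have hxs : PySem.Str.strIsalpha (PySem.List.pyGetD (PySem.Str.split₀ x) 1 "") = true := by
    simpa [pvIsPr] using hx
  simp only [sortOrdersKeyB, pvTrip, hxs, if_true]

lemma pv_keyB_nonprime (x : String) (hx : pvIsPr x = false) :
    sortOrdersKeyB x = [[""], [], [""], [""]] := by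
  have hxs : PySem.Str.strIsalpha (PySem.List.pyGetD (PySem.Str.split₀ x) 1 "") = false := by
    simpa [pvIsPr] using hx
  simp only [sortOrdersKeyB, hxs, Bool.false_eq_true, if_false]

lemma pv_proj_trip (x : String) : pvProj (pvTrip x) = x := rfl

-- the main invariant: B's insertion-sort fold over a prefix equals A's assembled result for it
lemma pv_main (l : List String) :
    l.foldl (fun acc x => PySem.List.insertBy pvBB x acc) []
      = (PySem.List.sorted ((l.filter pvIsPr).map pvTrip) (fun x => x) false).map pvProj
        ++ l.filter (fun i => !pvIsPr i) := by
  induction l using List.reverseRecOn with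
  | nil => simp [PySem.List.sorted]
  | append_singleton l' x ih =>
    rw [List.foldl_append, List.foldl_cons, List.foldl_nil, ih]
    by_cases hx : pvIsPr x = true
    · -- x is a prime log: it is inserted among the prime block, before all nonprime logs
      have hbs : ∀ y ∈ l'.filter (fun i => !pvIsPr i), pvBB x y = true := by
        intro y hy
        have hy' : pvIsPr y = false := by
          have := List.of_mem_filter hy; simpa using this
        rw [pvBB, pv_keyB_prime x hx, pv_keyB_nonprime y hy']
        exact decide_eq_true (List.Lex.rel (List.nil_lt_cons _ _))
      rw [pv_insertBy_append_all_before pvBB x _ _ hbs]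
      have hmap : ∀ t ∈ PySem.List.sorted ((l'.filter pvIsPr).map pvTrip) (fun x => x) false,
          pvBB x (pvProj t) = pvBA (pvTrip x) t := by
        intro t ht
        rw [PySem.List.mem_sorted] at ht
        obtain ⟨it, hit, rfl⟩ := List.mem_map.mp ht
        have hp : pvIsPr it = true := by
          have := List.of_mem_filter hit; simpa using this
        rw [pvBB, pvBA, pv_proj_trip, pv_keyB_prime x hx, pv_keyB_prime it hp]
        exact decide_eq_decide.mpr List.lex_cons_iff
      have := pv_insertBy_map pvBA pvBB pvProj (pvTrip x) _ hmap
      rw [pv_proj_trip] at this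
      rw [this]
      rw [List.filter_append, List.filter_append, List.filter_singleton]
      simp only [hx, Bool.not_true, List.filter_singleton, cond_true, cond_false, List.append_nil]
      rw [List.map_append, List.map_singleton]
      rw [PySem.List.sorted_eq_foldl_insertBy, PySem.List.sorted_eq_foldl_insertBy,
        List.foldl_append, List.foldl_cons, List.foldl_nil]
      rfl
    · -- x is a nonprime log: it goes to the very end
      have hall : ∀ y ∈ (PySem.List.sorted ((l'.filter pvIsPr).map pvTrip) (fun x => x) false).map pvProj
          ++ l'.filter (fun i => !pvIsPr i), pvBB x y = false := by
        intro y hy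
        rcases List.mem_append.mp hy with hy | hy
        · obtain ⟨t, ht, rfl⟩ := List.mem_map.mp hy
          rw [PySem.List.mem_sorted] at ht
          obtain ⟨it, hit, rfl⟩ := List.mem_map.mp ht
          have hp : pvIsPr it = true := by
            have := List.of_mem_filter hit; simpa using this
          rw [pvBB, pv_proj_trip, pv_keyB_nonprime x (by simpa using hx), pv_keyB_prime it hp]
          exact decide_eq_false (fun h => by cases h with | rel hr => cases hr)
        · have hy' : pvIsPr y = false := by
            have := List.of_mem_filter hy; simpa using this
          rw [pvBB, pv_keyB_nonprime x (by simpa using hx), pv_keyB_nonprime y hy']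
          exact decide_eq_false (lt_irrefl _)
      rw [PySem.List.insertBy_of_forall_not_before pvBB x _ hall]
      rw [List.filter_append, List.filter_append, List.filter_singleton]
      simp only [hx, List.filter_singleton, Bool.not_false, cond_true, cond_false, List.append_nil]
      simp

-- ===== VERDICT (by name: the statement is the Claim_ definition above) =====
theorem sortOrders_spec : Claim_equal_sortOrders := by
  intro orderList _ _
  show sortOrders orderList = sortOrders_alt orderList
  rw [sortOrders, sortOrders_alt]
  rw [pv_fold_partition orderList [] []]
  rw [PySem.List.sorted_eq_foldl_insertBy orderList sortOrdersKeyB]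
  simpa [pvBB] using (pv_main orderList).symm
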